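-- pv_equiv track=rewrite | github.com/superyodi/burning-algorithm | kakao/winterintern2019_test4.py | solution
-- ===== SOURCE A (Python) =====
-- def solution(k, room_number):
--     answer = []
--
--     max_number = 0
--     rooms = dict()
--
--     for num in room_number:
--
--         if num not in rooms:
--             answer.append(num)
--             rooms[num] = num + 1
--
--         else:
--
--             key = num
--             path = []
--             while key in rooms:
--                 path.append(key)
--                 key = rooms[key]
--
--             while path:
--                 now = path.pop()
--                 rooms[now] = key + 1
--
--             rooms[key] = key + 1
--
--             answer.append(key)
--
--     return answer
-- ===== SOURCE B (Python) =====
-- def solution(k, room_number):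
--     answer = []
--     occupied = set()
--     for num in room_number:
--         r = num
--         while r in occupied:
--             r += 1
--         answer.append(r)
--         occupied.add(r)
--     return answer
-- ===== Notes on version B (the rewrite author's own statement) =====
-- stated objective: simpler
-- what changed: Replaced A's pointer-dict chain walk with explicit path list and two compression passes by a plain occupied-set with a linear scan upward from the requested room; no dict of successor pointers, no path list, one short loop per query.
import Mathlib
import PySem

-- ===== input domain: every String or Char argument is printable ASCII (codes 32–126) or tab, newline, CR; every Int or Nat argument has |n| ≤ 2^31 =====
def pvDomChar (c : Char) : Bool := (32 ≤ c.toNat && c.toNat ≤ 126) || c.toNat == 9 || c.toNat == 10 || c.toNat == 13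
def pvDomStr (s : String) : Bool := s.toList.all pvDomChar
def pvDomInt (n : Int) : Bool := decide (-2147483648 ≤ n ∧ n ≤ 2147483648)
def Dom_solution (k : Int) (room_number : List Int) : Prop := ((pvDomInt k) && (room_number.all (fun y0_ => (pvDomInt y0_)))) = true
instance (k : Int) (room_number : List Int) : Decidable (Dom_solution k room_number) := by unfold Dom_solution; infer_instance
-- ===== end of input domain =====

-- B replaces A's successor-pointer dict (chain walk + path-compression passes) by a plain
-- occupied set scanned upward one room at a time: simpler state, no path list, same answers.

-- ===== PORT A =====
-- inner 'while key in rooms' loop of A; fuel only makes the loop total, it never changes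
-- the value on reachable states (each chain step visits a fresh key of the dict)
def pvWalkA (fuel : Nat) (rooms : PySem.Dict Int Int) (key : Int) (path : List Int) :
    List Int × Int :=
  match fuel with
  | 0 => (path, key)
  | fuel + 1 =>
    match rooms.get? key with
    | none => (path, key)
    | some v => pvWalkA fuel rooms v (path ++ [key])

-- body of A's 'for num in room_number' loop
def pvStepA (st : List Int × PySem.Dict Int Int) (num : Int) :
    List Int × PySem.Dict Int Int :=
  if st.2.contains num = false then
    (st.1 ++ [num], st.2.insert num (num + 1))
  else
    let pk := pvWalkA (st.2.size + 1) st.2 num []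
    -- 'while path: now = path.pop(); rooms[now] = key + 1'
    let rooms1 := pk.1.reverse.foldl (fun r now => r.insert now (pk.2 + 1)) st.2
    (st.1 ++ [pk.2], rooms1.insert pk.2 (pk.2 + 1))

def solution (k : Int) (room_number : List Int) : List Int :=
  (room_number.foldl pvStepA ([], PySem.Dict.empty)).1

-- ===== PORT B =====
-- 'while r in occupied: r += 1'; fuel (size of the set + 1) only makes the loop total
def pvFindFree (fuel : Nat) (occ : PySem.Set Int) (r : Int) : Int :=
  match fuel with
  | 0 => r
  | fuel + 1 => if occ.contains r then pvFindFree fuel occ (r + 1) else r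

def pvStepB (st : List Int × PySem.Set Int) (num : Int) :
    List Int × PySem.Set Int :=
  let r := pvFindFree (st.2.length + 1) st.2 num
  (st.1 ++ [r], PySem.Set.add st.2 r)

def solution_alt (k : Int) (room_number : List Int) : List Int :=
  (room_number.foldl pvStepB ([], PySem.Set.empty)).1

-- ===== PRECONDITION & SPEC =====
def Spec_solution (k : Int) (room_number : List Int) (out : List Int) : Prop := out = solution_alt k room_number
instance (k : Int) (room_number : List Int) (out : List Int) : Decidable (Spec_solution k room_number out) := by unfold Spec_solution; infer_instance

-- ===== CLAIM (what is proved, stated in full; the proofs are below) =====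
def Claim_equal_solution : Prop := ∀ (k : Int) (room_number : List Int), Dom_solution k room_number → Spec_solution k room_number (solution k room_number)

-- ===== LEMMAS AND PROOFS =====

-- "r is the smallest room ≥ num that is not occupied", occupancy read as list membership
def pvFree (occ : List Int) (num r : Int) : Prop :=
  num ≤ r ∧ r ∉ occ ∧ ∀ y, num ≤ y → y < r → y ∈ occ

theorem pvFree_unique {occ : List Int} {num r r' : Int}
    (h : pvFree occ num r) (h' : pvFree occ num r') : r = r' := by
  obtain ⟨hn, hr, hall⟩ := h
  obtain ⟨hn', hr', hall'⟩ := h'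
  rcases lt_trichotomy r r' with hlt | he | hgt
  · exact absurd (hall' r hn hlt) hr
  · exact he
  · exact absurd (hall r' hn' hgt) hr'

-- in a duplicate-free list, strictly fewer elements are ≥ b than are ≥ a when a ∈ l, a < b
theorem pvFilter_lt (l : List Int) (a b : Int) (hnd : l.Nodup) (ha : a ∈ l) (hab : a < b) :
    (l.filter (fun x => decide (b ≤ x))).length < (l.filter (fun x => decide (a ≤ x))).length := by
  induction l with
  | nil => simp at ha
  | cons h t ih =>
    rcases List.nodup_cons.mp hnd with ⟨hht, hndt⟩
    have hmono : (t.filter (fun x => decide (b ≤ x))).length ≤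
        (t.filter (fun x => decide (a ≤ x))).length := by
      apply List.Sublist.length_le
      apply List.monotone_filter_right
      intro x hx
      simp only [decide_eq_true_eq] at hx ⊢
      omega
    rcases List.mem_cons.mp ha with rfl | hat
    · have hba : ¬ b ≤ a := by omega
      simp [hba]
      omega
    · have := ih hndt hat
      by_cases hb : b ≤ h
      · have hA : a ≤ h := by omega
        simp [hb, hA]
        omega
      · by_cases hA : a ≤ h <;> simp [hb, hA] <;> omega

-- membership after Python's set.add, as a Bool equation
theorem pvSetAdd_contains (s : PySem.Set Int) (x y : Int) :
    PySem.Set.contains (PySem.Set.add s x) y = (decide (y = x) || PySem.Set.contains s y) := by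
  by_cases hyx : y = x
  · subst hyx
    simp [PySem.Set.contains, PySem.Set.mem_add]
  · simp [PySem.Set.contains, PySem.Set.mem_add, hyx]

-- ----- B side: the scan computes pvFree -----
theorem pvFindFree_spec (occ : PySem.Set Int) (hnd : occ.Nodup) :
    ∀ (fuel : Nat) (num : Int),
      (occ.filter (fun x => decide (num ≤ x))).length < fuel →
      pvFree occ num (pvFindFree fuel occ num) := by
  intro fuel
  induction fuel with
  | zero => intro num h; omega
  | succ fuel ih =>
    intro num hlt
    by_cases hmem : num ∈ occ
    · have hc : PySem.Set.contains occ num = true := by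
        simp [PySem.Set.contains]; exact hmem
      have hfl : (occ.filter (fun x => decide ((num + 1) ≤ x))).length < fuel := by
        have := pvFilter_lt occ num (num + 1) hnd hmem (by omega)
        omega
      have hrec := ih (num + 1) hfl
      simp only [pvFindFree, hc, if_true]
      obtain ⟨h1, h2, h3⟩ := hrec
      refine ⟨by omega, h2, ?_⟩
      intro y hy1 hy2
      by_cases hy : y = num
      · subst hy; exact hmem
      · exact h3 y (by omega) hy2
    · have hc : PySem.Set.contains occ num = false := by
        simp [PySem.Set.contains]; exact hmem
      simp only [pvFindFree, hc, Bool.false_eq_true, if_false]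
      exact ⟨le_refl _, hmem, fun y h1 h2 => absurd h2 (by omega)⟩

-- ----- A side: dict invariant -----
-- every stored pointer jumps to a larger room and everything strictly in between is a key
def pvInv (rooms : PySem.Dict Int Int) : Prop :=
  rooms.keys.Nodup ∧
  ∀ x v, rooms.get? x = some v →
    x < v ∧ ∀ y, x ≤ y → y < v → rooms.contains y = true

theorem pvContains_iff (rooms : PySem.Dict Int Int) (y : Int) :
    rooms.contains y = true ↔ y ∈ rooms.keys :=
  PySem.Dict.contains_iff_mem_keys rooms y

theorem pvWalkA_spec (rooms : PySem.Dict Int Int) (hInv : pvInv rooms) :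
    ∀ (fuel : Nat) (key : Int) (path : List Int),
      (rooms.keys.filter (fun x => decide (key ≤ x))).length < fuel →
      rooms.contains (pvWalkA fuel rooms key path).2 = false ∧
      key ≤ (pvWalkA fuel rooms key path).2 ∧
      (∀ y, key ≤ y → y < (pvWalkA fuel rooms key path).2 → rooms.contains y = true) ∧
      (∀ p ∈ (pvWalkA fuel rooms key path).1,
        p ∈ path ∨ (key ≤ p ∧ p < (pvWalkA fuel rooms key path).2 ∧ rooms.contains p = true)) := by
  intro fuel
  induction fuel with
  | zero => intro key path h; omega
  | succ fuel ih =>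
    intro key path hlt
    rcases hv : rooms.get? key with _ | v
    · have hc : rooms.contains key = false := by
        rw [PySem.Dict.contains_eq_isSome_get?, hv]; rfl
      simp only [pvWalkA, hv]
      exact ⟨hc, le_refl _, fun y h1 h2 => absurd h2 (by omega),
        fun p hp => Or.inl hp⟩
    · have hc : rooms.contains key = true := by
        rw [PySem.Dict.contains_eq_isSome_get?, hv]; rfl
      have hkmem : key ∈ rooms.keys := (pvContains_iff rooms key).mp hc
      obtain ⟨hkv, hbetween⟩ := hInv.2 key v hv
      have hfl : (rooms.keys.filter (fun x => decide (v ≤ x))).length < fuel := by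
        have := pvFilter_lt rooms.keys key v hInv.1 hkmem hkv
        omega
      have hrec := ih v (path ++ [key]) hfl
      simp only [pvWalkA, hv]
      obtain ⟨h1, h2, h3, h4⟩ := hrec
      refine ⟨h1, by omega, ?_, ?_⟩
      · intro y hy1 hy2
        by_cases hy : y < v
        · exact hbetween y hy1 hy
        · exact h3 y (by omega) hy2
      · intro p hp
        rcases h4 p hp with hmem | ⟨ha, hb, hc'⟩
        · rcases List.mem_append.mp hmem with h | h
          · exact Or.inl h
          · simp at h; subst h
            exact Or.inr ⟨le_refl _, by omega, hc⟩
        · exact Or.inr ⟨by omega, hb, hc'⟩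

-- lookup in the dict after A's compression pass: every room on the path now points to key + 1
theorem pvGet_foldl_insert (ps : List Int) (d : PySem.Dict Int Int) (c y : Int) :
    (ps.foldl (fun r now => r.insert now c) d).get? y =
      if y ∈ ps then some c else d.get? y := by
  induction ps generalizing d with
  | nil => simp
  | cons p t ih =>
    simp only [List.foldl_cons, ih, PySem.Dict.get?_insert]
    by_cases hyt : y ∈ t
    · simp [hyt]
    · by_cases hyp : y = p <;> simp [hyt, hyp]

-- the whole per-query step, A vs B: same answer appended, invariants and key-set kept in sync
theorem pvStep_sim (stA : List Int × PySem.Dict Int Int) (stB : List Int × PySem.Set Int)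
    (num : Int) (hans : stA.1 = stB.1) (hInv : pvInv stA.2) (hndB : stB.2.Nodup)
    (hsame : ∀ y, stA.2.contains y = PySem.Set.contains stB.2 y) :
    (pvStepA stA num).1 = (pvStepB stB num).1 ∧ pvInv (pvStepA stA num).2 ∧
    (pvStepB stB num).2.Nodup ∧
    (∀ y, (pvStepA stA num).2.contains y = PySem.Set.contains (pvStepB stB num).2 y) := by
  obtain ⟨ansA, rooms⟩ := stA
  obtain ⟨ansB, occ⟩ := stB
  simp only at hans hInv hndB hsame
  subst hans
  have hfuelB : (occ.filter (fun x => decide (num ≤ x))).length < occ.length + 1 :=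
    Nat.lt_succ_of_le (List.length_filter_le _ _)
  have hfreeB := pvFindFree_spec occ hndB (occ.length + 1) num hfuelB
  have hcontains_mem : ∀ y, (PySem.Set.contains occ y = true) ↔ y ∈ occ := by
    intro y; simp [PySem.Set.contains]
  by_cases hmem : rooms.contains num = false
  · -- fresh room: both return num
    have hnocc : num ∉ occ := by
      intro h
      have := (hcontains_mem num).mpr h
      rw [← hsame num] at this
      simp [hmem] at this
    have hrnum : pvFindFree (occ.length + 1) occ num = num :=
      pvFree_unique hfreeB ⟨le_refl _, hnocc, fun y h1 h2 => absurd (by omega : num < num) (by omega)⟩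
    simp only [pvStepA, pvStepB, hmem, if_true]
    refine ⟨by rw [hrnum], ?_, ?_, ?_⟩
    · constructor
      · exact PySem.Dict.nodup_keys_insert _ _ _ hInv.1
      · intro x v hx
        rw [PySem.Dict.get?_insert] at hx
        by_cases hxn : x = num
        · simp [hxn] at hx
          subst hxn
          refine ⟨by omega, ?_⟩
          intro y h1 h2
          have hyx : y = x := by omega
          subst hyx
          simp
        · simp [hxn] at hx
          obtain ⟨hv, hbet⟩ := hInv.2 x v hx
          refine ⟨hv, fun y h1 h2 => ?_⟩
          rw [PySem.Dict.contains_insert]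
          simp [hbet y h1 h2]
    · exact PySem.Set.nodup_add occ _ hndB
    · intro y
      rw [hrnum, PySem.Dict.contains_insert, pvSetAdd_contains, hsame y]
      by_cases hyr : y = num <;> simp [hyr]
  · -- occupied: A walks the chain, B scans; both reach the same minimal free room
    simp only [Bool.not_eq_false] at hmem
    simp only [pvStepA, pvStepB, hmem, Bool.true_eq_false, if_false]
    set pk := pvWalkA (rooms.size + 1) rooms num [] with hpk
    have hfuelA : (rooms.keys.filter (fun x => decide (num ≤ x))).length < rooms.size + 1 := by
      have h1 : (rooms.keys.filter (fun x => decide (num ≤ x))).length ≤ rooms.keys.length :=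
        List.length_filter_le _ _
      have h2 : rooms.keys.length = rooms.size := by
        simp [PySem.Dict.keys, PySem.Dict.size]
      omega
    have hwalk := pvWalkA_spec rooms hInv (rooms.size + 1) num [] hfuelA
    rw [← hpk] at hwalk
    obtain ⟨hkfree, hkle, hkall, hpath⟩ := hwalk
    have hpath' : ∀ p ∈ pk.1, num ≤ p ∧ p < pk.2 ∧ rooms.contains p = true := by
      intro p hp
      rcases hpath p hp with h | h
      · simp at h
      · exact h
    have hfreeA : pvFree occ num pk.2 := by
      refine ⟨hkle, ?_, ?_⟩
      · intro h
        have := (hcontains_mem pk.2).mpr h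
        rw [← hsame pk.2] at this
        simp [hkfree] at this
      · intro y h1 h2
        have := hkall y h1 h2
        rw [hsame y] at this
        exact (hcontains_mem y).mp this
    have hkey : pk.2 = pvFindFree (occ.length + 1) occ num := pvFree_unique hfreeA hfreeB
    -- lookup in A's updated dict
    have hget2 : ∀ y, ((pk.1.reverse.foldl (fun r now => r.insert now (pk.2 + 1)) rooms).insert pk.2 (pk.2 + 1)).get? y =
        if y = pk.2 then some (pk.2 + 1) else if y ∈ pk.1 then some (pk.2 + 1) else rooms.get? y := by
      intro y
      rw [PySem.Dict.get?_insert, pvGet_foldl_insert]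
      simp [List.mem_reverse]
    have hnewcontains : ∀ y, ((pk.1.reverse.foldl (fun r now => r.insert now (pk.2 + 1)) rooms).insert pk.2 (pk.2 + 1)).contains y =
        (y == pk.2 || rooms.contains y) := by
      intro y
      rw [PySem.Dict.contains_eq_isSome_get?, hget2 y, PySem.Dict.contains_eq_isSome_get?]
      by_cases h1 : y = pk.2
      · simp [h1]
      · by_cases h2 : y ∈ pk.1
        · have := (hpath' y h2).2.2
          rw [PySem.Dict.contains_eq_isSome_get?] at this
          simp [h1, h2, this]
        · simp [h1, h2]
    refine ⟨by rw [hkey], ?_, ?_, ?_⟩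
    · -- invariant preserved
      constructor
      · exact PySem.Dict.nodup_keys_insert _ _ _
          (PySem.Dict.nodup_keys_foldl_insert _ (fun _ _ => pk.2 + 1) _ hInv.1)
      · intro x v hx
        rw [hget2 x] at hx
        by_cases hx2 : x = pk.2
        · subst hx2
          simp at hx
          refine ⟨by omega, fun y h1 h2 => ?_⟩
          rw [hnewcontains y]
          have hy : y = pk.2 := by omega
          simp [hy]
        · simp [hx2] at hx
          by_cases hx1 : x ∈ pk.1
          · simp [hx1] at hx
            obtain ⟨hxn, hxk, _⟩ := hpath' x hx1
            refine ⟨by omega, fun y h1 h2 => ?_⟩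
            rw [hnewcontains y]
            by_cases hy : y = pk.2
            · simp [hy]
            · simp [hkall y (by omega) (by omega)]
          · simp [hx1] at hx
            obtain ⟨hv, hbet⟩ := hInv.2 x v hx
            refine ⟨hv, fun y h1 h2 => ?_⟩
            rw [hnewcontains y]
            simp [hbet y h1 h2]
    · -- B's set stays duplicate-free
      exact PySem.Set.nodup_add occ _ hndB
    · -- key sets stay equal
      intro y
      rw [← hkey, hnewcontains y, pvSetAdd_contains, hsame y]
      by_cases hyr : y = pk.2 <;> simp [hyr]

theorem pvFold_sim (l : List Int) :
    ∀ (stA : List Int × PySem.Dict Int Int) (stB : List Int × PySem.Set Int),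
      stA.1 = stB.1 → pvInv stA.2 → stB.2.Nodup →
      (∀ y, stA.2.contains y = PySem.Set.contains stB.2 y) →
      (l.foldl pvStepA stA).1 = (l.foldl pvStepB stB).1 := by
  induction l with
  | nil => intro _ _ h _ _ _; exact h
  | cons num t ih =>
    intro stA stB hans hInv hnd hsame
    obtain ⟨h1, h2, h3, h4⟩ := pvStep_sim stA stB num hans hInv hnd hsame
    simpa using ih (pvStepA stA num) (pvStepB stB num) h1 h2 h3 h4

-- ===== VERDICT (by name: the statement is the Claim_ definition above) =====
theorem solution_spec : Claim_equal_solution := by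
  intro k room_number _
  unfold Spec_solution solution solution_alt
  apply pvFold_sim
  · rfl
  · exact ⟨by simp [PySem.Dict.empty, PySem.Dict.keys], by intro x v h; simp [PySem.Dict.get?_empty] at h⟩
  · exact List.nodup_nil
  · intro y; simp [PySem.Dict.contains_empty, PySem.Set.empty, PySem.Set.contains]
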